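-- pv_equiv track=rewrite | github.com/dinesh-git17/silly-side-quests | dayplan.py | _format_core_section
-- ===== SOURCE A (Python) =====
-- _CORE_LABELS: dict[str, tuple[str, str, str]] = {
--     "soft": ("Start with:", "Then:", "If energy allows:"),
--     "neutral": ("First:", "Next:", "Additionally:"),
--     "direct": ("First:", "Next:", "Then:"),
-- }
--
-- def _format_core_section(tasks: tuple[str, ...], style: str) -> str:
--     """Format the core task section with style-appropriate labels.
--
--     Returns an empty string when no core tasks exist.
--     """
--     if not tasks:
--         return ""
--
--     first_label, second_label, rest_label = _CORE_LABELS[style]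
--     lines: list[str] = [first_label, f"\u2022 {tasks[0]}"]
--
--     if len(tasks) >= 2:
--         lines.append("")
--         lines.append(second_label)
--         lines.append(f"\u2022 {tasks[1]}")
--
--     if len(tasks) >= 3:
--         lines.append("")
--         lines.append(rest_label)
--         for task in tasks[2:]:
--             lines.append(f"\u2022 {task}")
--
--     return "\n".join(lines)
-- ===== SOURCE B (Python) =====
-- _CORE_LABELS: dict[str, tuple[str, str, str]] = {
--     "soft": ("Start with:", "Then:", "If energy allows:"),
--     "neutral": ("First:", "Next:", "Additionally:"),
--     "direct": ("First:", "Next:", "Then:"),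
-- }
--
--
-- def _format_core_section(tasks: tuple[str, ...], style: str) -> str:
--     """Format the core task section with style-appropriate labels.
--
--     Single pass: each task contributes its own prefix (a label line for the
--     first three positions, a bare newline afterwards) followed by its bullet.
--     """
--     if not tasks:
--         return ""
--     labels = _CORE_LABELS[style]
--     out = ""
--     for i, task in enumerate(tasks):
--         if i == 0:
--             out += labels[0] + "\n"
--         elif i < 3:
--             out += "\n\n" + labels[i] + "\n"
--         else:
--             out += "\n"
--         out += f"\u2022 {task}"
--     return out
-- ===== Notes on version B (the rewrite author's own statement) =====
-- stated objective: alternative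
-- what changed: Replaces A's staged slice-and-branch assembly of a lines list joined with '\n' by a single indexed pass with a string accumulator, where each task emits its own prefix (a label line at positions 0-2, a bare newline afterwards) followed by its bullet.
import Mathlib
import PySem

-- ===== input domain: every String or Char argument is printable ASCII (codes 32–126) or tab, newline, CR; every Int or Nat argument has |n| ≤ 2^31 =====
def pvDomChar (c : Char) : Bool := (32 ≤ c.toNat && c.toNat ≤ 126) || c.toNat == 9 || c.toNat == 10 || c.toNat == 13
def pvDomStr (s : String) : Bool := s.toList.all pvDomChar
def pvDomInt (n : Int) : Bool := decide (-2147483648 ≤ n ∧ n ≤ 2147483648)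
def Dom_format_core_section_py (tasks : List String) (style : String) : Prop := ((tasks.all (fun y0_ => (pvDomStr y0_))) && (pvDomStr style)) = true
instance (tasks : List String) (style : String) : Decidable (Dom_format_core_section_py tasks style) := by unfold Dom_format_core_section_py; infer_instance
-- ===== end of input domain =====

-- B replaces A's staged slice-and-join assembly by one indexed pass with a string
-- accumulator: each task emits its own prefix (label line for positions 0..2, bare
-- newline after) then its bullet — simpler decomposition, same O(n) cost.

-- the module constant _CORE_LABELS (shared context of both programs)
def pyCoreLabels : PySem.Dict String (String × String × String) :=
  ((PySem.Dict.empty.insert "soft" ("Start with:", "Then:", "If energy allows:")).insert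
      "neutral" ("First:", "Next:", "Additionally:")).insert
    "direct" ("First:", "Next:", "Then:")

-- ===== PORT A =====
def format_core_section_py (tasks : List String) (style : String) : String :=
  match tasks with
  | [] => ""
  | t0 :: rest =>
    match pyCoreLabels.get? style with
    | none => ""            -- Python raises KeyError here; excluded by Pre_
    | some (first_label, second_label, rest_label) =>
      let lines : List String := [first_label, "• " ++ t0]
      let lines := if 2 ≤ (t0 :: rest).length then
          lines ++ ["", second_label, "• " ++ rest.headD ""] else lines
      let lines := if 3 ≤ (t0 :: rest).length then
          ((t0 :: rest).drop 2).foldl (fun acc t => acc ++ ["• " ++ t]) (lines ++ ["", rest_label])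
        else lines
      PySem.Str.join "\n" lines

-- ===== PORT B =====
-- one loop step of B: prefix for position i, then the bullet
def bStep (labels : String × String × String) (out : String) (p : Int × String) : String :=
  let out :=
    if p.1 = 0 then out ++ labels.1 ++ "\n"
    else if p.1 < 3 then
      out ++ "\n\n" ++ (if p.1 = 1 then labels.2.1 else labels.2.2) ++ "\n"
    else out ++ "\n"
  out ++ "• " ++ p.2

def format_core_section_py_alt (tasks : List String) (style : String) : String :=
  if tasks = [] then ""
  else
    match pyCoreLabels.get? style with
    | none => ""            -- Python raises KeyError here; excluded by Pre_
    | some labels =>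
      (PySem.List.enumerate tasks 0).foldl (bStep labels) ""

-- ===== PRECONDITION & SPEC =====
-- Pre_ excludes exactly the inputs where A raises KeyError: nonempty tasks with a style
-- that is not one of the three label keys.
def Pre_format_core_section_py (tasks : List String) (style : String) : Prop :=
  tasks = [] ∨ style = "soft" ∨ style = "neutral" ∨ style = "direct"
instance (tasks : List String) (style : String) : Decidable (Pre_format_core_section_py tasks style) := by unfold Pre_format_core_section_py; infer_instance

def pvWitness_format_core_section_py : List String × String := (["walk", "read", "rest"], "soft")

def Spec_format_core_section_py (tasks : List String) (style : String) (out : String) : Prop := out = format_core_section_py_alt tasks style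
instance (tasks : List String) (style : String) (out : String) : Decidable (Spec_format_core_section_py tasks style out) := by unfold Spec_format_core_section_py; infer_instance

-- ===== CLAIM (what is proved, stated in full; the proofs are below) =====
def Claim_equal_format_core_section_py : Prop := ∀ (tasks : List String) (style : String), Dom_format_core_section_py tasks style → Pre_format_core_section_py tasks style → Spec_format_core_section_py tasks style (format_core_section_py tasks style)

-- ===== LEMMAS AND PROOFS =====

-- "\n".join over a nonempty list, on the character level
lemma join_nl (x : String) (xs : List String) :
    (PySem.Str.join "\n" (x :: xs)).toList
      = x.toList ++ (xs.map (fun t => '\n' :: t.toList)).flatten := by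
  induction xs generalizing x with
  | nil => simp [PySem.Chars.join_singleton]
  | cons y ys ih =>
      have step : (PySem.Str.join "\n" (x :: y :: ys)).toList
          = x.toList ++ '\n' :: (PySem.Str.join "\n" (y :: ys)).toList := by
        simp [PySem.Str.join, PySem.Chars.join_cons_cons]
      rw [step, ih y]
      simp

-- B's fold over indices ≥ 3 only appends "\n• task" for each task
lemma fold_tail (L : String × String × String) (rs : List String) (acc : String) (n : Int)
    (h : 3 ≤ n) :
    ((PySem.List.enumerate rs n).foldl (bStep L) acc).toList
      = acc.toList ++ (rs.map (fun t => '\n' :: '•' :: ' ' :: t.toList)).flatten := by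
  induction rs generalizing acc n with
  | nil => simp [PySem.List.enumerate_nil]
  | cons t ts ih =>
      rw [PySem.List.enumerate_cons]
      simp only [List.foldl_cons]
      rw [ih _ (n + 1) (by omega)]
      have h0 : ¬ n = 0 := by omega
      have h3 : ¬ n < 3 := by omega
      simp [bStep, h0, h3]

-- ===== VERDICT (by name: the statement is the Claim_ definition above) =====
theorem format_core_section_py_spec : Claim_equal_format_core_section_py := by
  intro tasks style _hd hpre
  unfold Spec_format_core_section_py
  have main : ∀ (L : String × String × String),
      pyCoreLabels.get? style = some L →
      format_core_section_py tasks style = format_core_section_py_alt tasks style := by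
    intro L hL
    obtain ⟨f, s, r⟩ := L
    cases tasks with
    | nil => simp [format_core_section_py, format_core_section_py_alt]
    | cons t0 rest =>
      apply String.toList_injective
      cases rest with
      | nil =>
          simp [format_core_section_py, format_core_section_py_alt, hL,
            PySem.List.enumerate_cons, PySem.List.enumerate_nil, bStep,
            PySem.Chars.join_cons_cons, PySem.Chars.join_singleton]
      | cons t1 rest' =>
        cases rest' with
        | nil =>
            simp [format_core_section_py, format_core_section_py_alt, hL,
              PySem.List.enumerate_cons, PySem.List.enumerate_nil, bStep,
              PySem.Chars.join_cons_cons, PySem.Chars.join_singleton]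
        | cons t2 rs =>
            have h2 : 2 ≤ (t0 :: t1 :: t2 :: rs).length := by
              simp only [List.length_cons]; omega
            have h3 : 3 ≤ (t0 :: t1 :: t2 :: rs).length := by
              simp only [List.length_cons]; omega
            have hne : ¬ (t0 :: t1 :: t2 :: rs) = [] := by simp
            simp only [format_core_section_py, format_core_section_py_alt, hL,
              if_pos h2, if_pos h3, if_neg hne,
              List.headD_cons, List.drop_succ_cons, List.drop_zero]
            rw [PySem.List.foldl_append_singleton_eq_map]
            rw [show ([f, "• " ++ t0] ++ ["", s, "• " ++ t1] ++ ["", r]) ++ (t2 :: rs).map (fun t => "• " ++ t)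
                  = f :: (["• " ++ t0, "", s, "• " ++ t1, "", r] ++ (t2 :: rs).map (fun t => "• " ++ t)) by simp]
            rw [join_nl]
            simp only [PySem.List.enumerate_cons, List.foldl_cons]
            rw [fold_tail _ rs _ (0+1+1+1) (by omega)]
            simp [bStep, Function.comp_def]
  rcases hpre with h | h | h | h
  · subst h; simp [format_core_section_py, format_core_section_py_alt]
  all_goals subst h
  · exact main _ rfl
  · exact main _ rfl
  · exact main _ rfl
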